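-- pv_equiv track=rewrite | github.com/roy-einstein/leetcodedaily | amazon2.py | getMinConnectionCost
-- ===== SOURCE A (Python) =====
-- def getMinConnectionCost(warehouseCapacity, queries):
--     n = len(warehouseCapacity)
--     # Precompute prefix sums for the warehouse capacities
--     prefix_sum = [0] * (n + 1)
--     for i in range(n):
--         prefix_sum[i + 1] = prefix_sum[i] + warehouseCapacity[i]
--
--     results = []
--
--     for hubA, hubB in queries:
--         # Convert 1-based index to 0-based index
--         hubA -= 1
--         hubB -= 1
--
--         min_total_cost = 0
--
--         for i in range(n):
--             if i <= hubA:
--                 cost_to_hubA = warehouseCapacity[hubA] - warehouseCapacity[i]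
--             else:
--                 cost_to_hubA = float('inf')
--
--             if i <= hubB:
--                 cost_to_hubB = warehouseCapacity[hubB] - warehouseCapacity[i]
--             else:
--                 cost_to_hubB = float('inf')
--
--             cost_to_central = warehouseCapacity[-1] - warehouseCapacity[i]
--
--             min_cost = min(cost_to_hubA, cost_to_hubB, cost_to_central)
--             min_total_cost += min_cost
--
--         results.append(min_total_cost)
--
--     return results
-- ===== SOURCE B (Python) =====
-- def getMinConnectionCost(warehouseCapacity, queries):
--     wc = warehouseCapacity
--     n = len(wc)
--     pre = [0]
--     for x in wc:
--         pre.append(pre[-1] + x)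
--     last = wc[-1] if wc else 0
--     res = []
--     for a, b in queries:
--         if not wc:
--             res.append(0)
--             continue
--         lo = min(a, b) - 1
--         hi = max(a, b) - 1
--         if hi >= 0:
--             mhi = min(wc[hi], last)
--             tail = (n - 1 - hi) * last - (pre[n] - pre[hi + 1])
--             if lo >= 0:
--                 mlo = min(wc[lo], mhi)
--                 res.append((lo + 1) * mlo - pre[lo + 1]
--                            + ((hi - lo) * mhi - (pre[hi + 1] - pre[lo + 1]))
--                            + tail)
--             else:
--                 res.append((hi + 1) * mhi - pre[hi + 1] + tail)
--         else:
--             res.append(n * last - pre[n])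
--     return res
-- ===== Notes on version B (the rewrite author's own statement) =====
-- stated objective: faster
-- what changed: B replaces A's O(n) inner scan per query by an O(1) closed form: the index range is split at the two hub positions into three regions where the minimum cost is a constant minus wc[i], and each region is summed with a precomputed prefix-sum array.
import Mathlib
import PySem

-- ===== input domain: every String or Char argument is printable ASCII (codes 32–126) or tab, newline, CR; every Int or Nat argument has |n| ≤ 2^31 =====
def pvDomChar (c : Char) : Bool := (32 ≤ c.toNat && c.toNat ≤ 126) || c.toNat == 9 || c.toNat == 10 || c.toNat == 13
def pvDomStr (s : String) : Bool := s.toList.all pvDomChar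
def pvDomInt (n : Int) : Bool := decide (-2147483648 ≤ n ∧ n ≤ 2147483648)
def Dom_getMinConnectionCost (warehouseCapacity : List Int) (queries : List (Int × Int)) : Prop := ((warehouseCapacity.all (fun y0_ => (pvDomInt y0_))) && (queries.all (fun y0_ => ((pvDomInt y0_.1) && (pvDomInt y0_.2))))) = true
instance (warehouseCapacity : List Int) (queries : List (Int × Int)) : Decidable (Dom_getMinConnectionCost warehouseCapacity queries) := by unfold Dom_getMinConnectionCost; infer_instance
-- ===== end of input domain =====

-- B replaces A's O(n) inner scan per query by an O(1) three-region prefix-sum formula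
-- (split at the two hub indices), turning O(n·Q) into O(n+Q).

-- ===== PORT A =====
-- Python's min of three values where the first two may be float('inf'):
-- none plays the role of float('inf'); ties keep the earlier argument (value-equal anyway).
def pvInfMin (x y : Option Int) : Option Int :=
  match x, y with
  | none, y => y
  | some a, none => some a
  | some a, some b => if b < a then some b else some a

-- inner "for i in range(n)" loop of A, per query (hubA hubB already 0-based)
def pvInnerA (wc : List Int) (hubA hubB : Int) : Int :=
  (List.range wc.length).foldl (fun acc (i : Nat) =>
    let costA : Option Int :=
      if (i : Int) ≤ hubA then some ((PySem.List.pyGet? wc hubA).getD 0 - wc.getD i 0) else none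
    let costB : Option Int :=
      if (i : Int) ≤ hubB then some ((PySem.List.pyGet? wc hubB).getD 0 - wc.getD i 0) else none
    let costC : Int := (PySem.List.pyGet? wc (-1)).getD 0 - wc.getD i 0
    acc + (pvInfMin (pvInfMin costA costB) (some costC)).getD 0) 0

def getMinConnectionCost (warehouseCapacity : List Int) (queries : List (Int × Int)) : List Int :=
  let n := warehouseCapacity.length
  -- prefix_sum = [0]*(n+1); for i in range(n): prefix_sum[i+1] = prefix_sum[i] + wc[i]  (dead code in A, kept)
  let _prefix_sum := (List.range n).foldl
    (fun ps i => ps.set (i + 1) (ps.getD i 0 + warehouseCapacity.getD i 0))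
    (List.replicate (n + 1) 0)
  queries.foldl (fun results q =>
    let hubA := q.1 - 1
    let hubB := q.2 - 1
    results ++ [pvInnerA warehouseCapacity hubA hubB]) []

-- ===== PORT B =====
-- per-query closed form of B (wc nonempty): three regions split at the two hubs
def pvBQuery (wc : List Int) (pre : List Int) (q : Int × Int) : Int :=
  let n : Int := wc.length
  let S : Int → Int := fun k => pre.getD k.toNat 0
  let last := wc.getLast?.getD 0
  if wc.isEmpty then 0 else
  let lo := min q.1 q.2 - 1
  let hi := max q.1 q.2 - 1
  if 0 ≤ hi then
    let mhi := min ((PySem.List.pyGet? wc hi).getD 0) last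
    let tail := (n - 1 - hi) * last - (S n - S (hi + 1))
    if 0 ≤ lo then
      let mlo := min ((PySem.List.pyGet? wc lo).getD 0) mhi
      (lo + 1) * mlo - S (lo + 1) + ((hi - lo) * mhi - (S (hi + 1) - S (lo + 1))) + tail
    else
      (hi + 1) * mhi - S (hi + 1) + tail
  else
    n * last - S n

def getMinConnectionCost_alt (warehouseCapacity : List Int) (queries : List (Int × Int)) : List Int :=
  let pre := List.scanl (· + ·) 0 warehouseCapacity
  queries.map (pvBQuery warehouseCapacity pre)

-- ===== PRECONDITION & SPEC =====
-- Pre_ excludes exactly the inputs where A raises IndexError: a nonempty warehouse list with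
-- some (1-based) hub index strictly greater than n (then wc[hub-1] is evaluated at i = 0).
def Pre_getMinConnectionCost (warehouseCapacity : List Int) (queries : List (Int × Int)) : Prop :=
  warehouseCapacity = [] ∨
    ∀ q ∈ queries, q.1 ≤ (warehouseCapacity.length : Int) ∧ q.2 ≤ (warehouseCapacity.length : Int)
instance (warehouseCapacity : List Int) (queries : List (Int × Int)) : Decidable (Pre_getMinConnectionCost warehouseCapacity queries) := by unfold Pre_getMinConnectionCost; infer_instance

def pvWitness_getMinConnectionCost : List Int × (List (Int × Int)) :=
  ([1, 3, 7], [(1, 2), (3, 3), (-5, 2)])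

def Spec_getMinConnectionCost (warehouseCapacity : List Int) (queries : List (Int × Int)) (out : List Int) : Prop := out = getMinConnectionCost_alt warehouseCapacity queries
instance (warehouseCapacity : List Int) (queries : List (Int × Int)) (out : List Int) : Decidable (Spec_getMinConnectionCost warehouseCapacity queries out) := by unfold Spec_getMinConnectionCost; infer_instance

-- ===== CLAIM (what is proved, stated in full; the proofs are below) =====
def Claim_equal_getMinConnectionCost : Prop := ∀ (warehouseCapacity : List Int) (queries : List (Int × Int)), Dom_getMinConnectionCost warehouseCapacity queries → Pre_getMinConnectionCost warehouseCapacity queries → Spec_getMinConnectionCost warehouseCapacity queries (getMinConnectionCost warehouseCapacity queries)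

-- ===== LEMMAS AND PROOFS =====

-- a foldl-sum over range n is a Finset sum
lemma pv_foldl_range_sum (f : ℕ → ℤ) (n : ℕ) :
    (List.range n).foldl (fun acc i => acc + f i) 0 = ∑ i ∈ Finset.range n, f i := by
  induction n with
  | zero => simp
  | succ n ih => rw [List.range_succ, List.foldl_append, ih, Finset.sum_range_succ]; simp

lemma pvInfMin_some_some (x y : Int) : pvInfMin (some x) (some y) = some (min x y) := by
  simp only [pvInfMin]
  split_ifs with h <;> (congr 1; omega)

lemma pvInfMin_none_left (y : Option Int) : pvInfMin none y = y := rfl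

lemma pvInfMin_some_none (x : Int) : pvInfMin (some x) none = some x := rfl

-- pointwise value of A's min-of-three, as a three-region piecewise constant minus wc[i]
lemma pv_fval (a b wa wb wl wi : ℤ) (i : ℕ) :
    (pvInfMin (pvInfMin (if (i : ℤ) ≤ a then some (wa - wi) else none)
        (if (i : ℤ) ≤ b then some (wb - wi) else none)) (some (wl - wi))).getD 0
    = (if (i : ℤ) ≤ min a b then min (min wa wb) wl
       else if (i : ℤ) ≤ max a b then (if a ≤ b then min wb wl else min wa wl)
       else wl) - wi := by
  by_cases h1 : (i : ℤ) ≤ a <;> by_cases h2 : (i : ℤ) ≤ b <;>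
    simp only [h1, h2, if_pos, if_neg, not_false_iff,
      pvInfMin_some_some, pvInfMin_none_left, pvInfMin_some_none, Option.getD_some] <;>
    omega

-- closed form of the piecewise-constant sum
lemma pv_sum_piecewise (c1 c2 c3 am aM : ℤ) (h : am ≤ aM) (n : ℕ) :
    ∑ i ∈ Finset.range n, (if (i : ℤ) ≤ am then c1 else if (i : ℤ) ≤ aM then c2 else c3)
    = (max 0 (min (n : ℤ) (am + 1))) * c1
      + (max 0 (min (n : ℤ) (aM + 1)) - max 0 (min (n : ℤ) (am + 1))) * c2
      + ((n : ℤ) - max 0 (min (n : ℤ) (aM + 1))) * c3 := by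
  induction n with
  | zero =>
    have h1 : max 0 (min ((0 : ℕ) : ℤ) (am + 1)) = 0 := by push_cast; omega
    have h2 : max 0 (min ((0 : ℕ) : ℤ) (aM + 1)) = 0 := by push_cast; omega
    rw [h1, h2]; simp
  | succ n ih =>
    rw [Finset.sum_range_succ, ih]
    by_cases h1 : (n : ℤ) ≤ am
    · have e1 : max 0 (min (((n : ℕ) + 1 : ℕ) : ℤ) (am + 1)) = max 0 (min (n : ℤ) (am + 1)) + 1 := by push_cast; omega
      have e2 : max 0 (min (((n : ℕ) + 1 : ℕ) : ℤ) (aM + 1)) = max 0 (min (n : ℤ) (aM + 1)) + 1 := by push_cast; omega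
      rw [if_pos h1, e1, e2]; push_cast; ring
    · by_cases h2 : (n : ℤ) ≤ aM
      · have e1 : max 0 (min (((n : ℕ) + 1 : ℕ) : ℤ) (am + 1)) = max 0 (min (n : ℤ) (am + 1)) := by push_cast; omega
        have e2 : max 0 (min (((n : ℕ) + 1 : ℕ) : ℤ) (aM + 1)) = max 0 (min (n : ℤ) (aM + 1)) + 1 := by push_cast; omega
        rw [if_neg h1, if_pos h2, e1, e2]; push_cast; ring
      · have e1 : max 0 (min (((n : ℕ) + 1 : ℕ) : ℤ) (am + 1)) = max 0 (min (n : ℤ) (am + 1)) := by push_cast; omega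
        have e2 : max 0 (min (((n : ℕ) + 1 : ℕ) : ℤ) (aM + 1)) = max 0 (min (n : ℤ) (aM + 1)) := by push_cast; omega
        rw [if_neg h1, if_neg h2, e1, e2]; push_cast; ring

-- ∑_{i<len} wc.getD i 0 = wc.sum
lemma pv_sum_getD (wc : List Int) :
    ∑ i ∈ Finset.range wc.length, wc.getD i 0 = wc.sum := by
  induction wc with
  | nil => simp
  | cons x xs ih =>
    rw [List.length_cons, Finset.sum_range_succ']
    simp only [List.getD_cons_succ, List.getD_cons_zero, List.sum_cons, ih]
    ring

-- the scanl prefix list evaluated at the full length is init + sum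
lemma pv_scanl_getD_length (wc : List Int) (s : Int) :
    (List.scanl (· + ·) s wc).getD wc.length 0 = s + wc.sum := by
  induction wc generalizing s with
  | nil => simp
  | cons x xs ih =>
    rw [List.scanl_cons]
    simp only [List.length_cons, List.getD_cons_succ]
    rw [ih (s + x), List.sum_cons]
    ring

-- per-query equality (covers the empty list as well)
lemma pv_inner_eq (wc : List Int) (q : Int × Int)
    (h1 : q.1 ≤ (wc.length : ℤ)) (h2 : q.2 ≤ (wc.length : ℤ)) :
    pvInnerA wc (q.1 - 1) (q.2 - 1) = pvBQuery wc (List.scanl (· + ·) 0 wc) q := by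
  rcases wc.eq_nil_or_concat with rfl | ⟨_, _, _⟩
  · simp [pvInnerA, pvBQuery]
  case inr hcat =>
  have hne : wc ≠ [] := by rcases hcat with ⟨ys, y, rfl⟩; simp
  have hn0 : 0 < wc.length := List.length_pos_iff.mpr hne
  set n := wc.length with hnn
  set a := q.1 - 1
  set b := q.2 - 1
  set wa := (PySem.List.pyGet? wc a).getD 0 with hwa
  set wb := (PySem.List.pyGet? wc b).getD 0 with hwb
  set wl := wc.getLast?.getD 0 with hwl
  have hlast : (PySem.List.pyGet? wc (-1)).getD 0 = wl := by
    rw [PySem.List.pyGet?_neg_one]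
  -- A side: fold → Finset sum of pointwise values
  have hA : pvInnerA wc a b
      = ∑ i ∈ Finset.range n,
          ((if (i : ℤ) ≤ min a b then min (min wa wb) wl
            else if (i : ℤ) ≤ max a b then (if a ≤ b then min wb wl else min wa wl)
            else wl) - wc.getD i 0) := by
    unfold pvInnerA
    rw [pv_foldl_range_sum]
    refine Finset.sum_congr rfl fun i _ => ?_
    simp only [hlast]
    exact pv_fval a b wa wb wl (wc.getD i 0) i
  rw [hA, Finset.sum_sub_distrib, pv_sum_getD,
    pv_sum_piecewise _ _ _ _ _ (min_le_max) n]
  -- B side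
  have hSn : (List.scanl (· + ·) 0 wc).getD ((n : ℤ)).toNat 0 = wc.sum := by
    have : ((n : ℤ)).toNat = n := by omega
    rw [this, pv_scanl_getD_length]; ring
  have hlo : min q.1 q.2 - 1 = min a b := by simp only [a, b]; omega
  have hhi : max q.1 q.2 - 1 = max a b := by simp only [a, b]; omega
  simp only [pvBQuery, hlo, hhi]
  rw [if_neg (by simp [hne] : ¬wc.isEmpty = true), ← hnn]
  by_cases hab : a ≤ b
  · have hmin : min a b = a := min_eq_left hab
    have hmax : max a b = b := max_eq_right hab
    rw [hmin, hmax, if_pos hab]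
    by_cases hb0 : 0 ≤ b
    · rw [if_pos hb0]
      have k2 : max 0 (min (n : ℤ) (b + 1)) = b + 1 := by omega
      by_cases ha0 : 0 ≤ a
      · rw [if_pos ha0]
        have k1 : max 0 (min (n : ℤ) (a + 1)) = a + 1 := by omega
        have hm : min wa (min wb wl) = min (min wa wb) wl := by omega
        rw [k1, k2, hSn, ← hwa, ← hwb, ← hwl, hm]
        ring
      · rw [if_neg ha0]
        have k1 : max 0 (min (n : ℤ) (a + 1)) = 0 := by omega
        rw [k1, k2, hSn, ← hwb, ← hwl]
        ring
    · rw [if_neg hb0]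
      have k2 : max 0 (min (n : ℤ) (b + 1)) = 0 := by omega
      have k1 : max 0 (min (n : ℤ) (a + 1)) = 0 := by omega
      rw [k1, k2, hSn, ← hwl]
      ring
  · have hba : b ≤ a := by omega
    have hmin : min a b = b := min_eq_right hba
    have hmax : max a b = a := max_eq_left hba
    rw [hmin, hmax, if_neg hab]
    by_cases ha0 : 0 ≤ a
    · rw [if_pos ha0]
      have k2 : max 0 (min (n : ℤ) (a + 1)) = a + 1 := by omega
      by_cases hb0 : 0 ≤ b
      · rw [if_pos hb0]
        have k1 : max 0 (min (n : ℤ) (b + 1)) = b + 1 := by omega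
        have hm : min wb (min wa wl) = min (min wa wb) wl := by omega
        rw [k1, k2, hSn, ← hwa, ← hwb, ← hwl, hm]
        ring
      · rw [if_neg hb0]
        have k1 : max 0 (min (n : ℤ) (b + 1)) = 0 := by omega
        rw [k1, k2, hSn, ← hwa, ← hwl]
        ring
    · rw [if_neg ha0]
      have k2 : max 0 (min (n : ℤ) (a + 1)) = 0 := by omega
      have k1 : max 0 (min (n : ℤ) (b + 1)) = 0 := by omega
      rw [k1, k2, hSn, ← hwl]
      ring

-- ===== VERDICT (by name: the statement is the Claim_ definition above) =====
theorem getMinConnectionCost_spec : Claim_equal_getMinConnectionCost := by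
  intro wc qs _ hpre
  unfold Spec_getMinConnectionCost getMinConnectionCost getMinConnectionCost_alt
  rw [PySem.List.foldl_append_singleton_eq_map, List.nil_append]
  refine List.map_congr_left fun q hq => ?_
  rcases hpre with rfl | hall
  · simp [pvInnerA, pvBQuery]
  · exact pv_inner_eq wc q (hall q hq).1 (hall q hq).2
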